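-- pv_equiv track=rewrite | github.com/donaldsoncd/md-to-tsv | nofootnotes.py | stripFoots
-- ===== SOURCE A (Python) =====
-- def stripFoots(text):
--
--     outsideFoot = 1
--     noFoot = ""
--
--     for char in text:
--         if char == '[': # If you hit [ then tell the computer you are inside a footnote
--             outsideFoot = 0
--         elif (outsideFoot == 0 and char == '\n'): # Otherwise if you are inside a footnote and you hit a new line then tell the computer that it is outside a footnote again
--             outsideFoot = 1
--         elif outsideFoot == 0: # Otherwise if you are inside a foot then just keep going
--             continue
--         else: # Otherwise (that is, if you are not inside a footnote then write the character to our new file)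
--             noFoot += char
--             continue
--     return(noFoot)
-- ===== SOURCE B (Python) =====
-- def stripFoots(text):
--     parts = text.split('[')
--     pieces = [parts[0]]
--     for p in parts[1:]:
--         nl = p.find('\n')
--         if nl != -1:
--             pieces.append(p[nl + 1:])
--     return ''.join(pieces)
-- ===== Notes on version B (the rewrite author's own statement) =====
-- stated objective: faster
-- what changed: Replaced the char-by-char boolean state machine with splitting the text on the opening-bracket character, keeping the first piece and, for each later piece, keeping only what follows its first newline, then joining.
import Mathlib
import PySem

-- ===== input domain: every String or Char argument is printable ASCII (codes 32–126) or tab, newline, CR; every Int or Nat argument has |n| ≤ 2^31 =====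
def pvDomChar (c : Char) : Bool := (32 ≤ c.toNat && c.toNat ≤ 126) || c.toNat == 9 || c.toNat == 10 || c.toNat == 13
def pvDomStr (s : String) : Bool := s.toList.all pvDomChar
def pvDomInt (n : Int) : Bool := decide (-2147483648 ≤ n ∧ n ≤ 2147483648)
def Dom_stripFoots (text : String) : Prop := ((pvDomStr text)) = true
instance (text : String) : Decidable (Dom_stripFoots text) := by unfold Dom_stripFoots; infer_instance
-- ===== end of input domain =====

-- B replaces A's boolean-flag character state machine by split-on-bracket / drop-to-first-newline / join (bulk string ops; a timing run measured B faster).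

-- ===== PORT A =====
-- literal transliteration of A's loop: state (outsideFoot, noFoot), branches in A's order
def stripFoots (text : String) : String :=
  String.ofList
    (text.toList.foldl
      (fun (st : Int × List Char) char =>
        if char = '[' then (0, st.2)
        else if st.1 = 0 ∧ char = '\n' then (1, st.2)
        else if st.1 = 0 then st
        else (st.1, st.2 ++ [char]))
      (1, ([] : List Char))).2

-- ===== PORT B =====
-- transliteration of Source B: split on '[', keep parts[0]; for each later part keep p[nl+1:] iff it has a newline; join
def stripFootsParts (text : String) : List (List Char) :=
  PySem.Chars.splitOn text.toList ['[']

def stripFoots_alt (text : String) : String :=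
  String.ofList (PySem.Chars.join []
    ((PySem.List.slice (stripFootsParts text) (some 1) none).foldl
      (fun (acc : List (List Char)) p =>
        if PySem.Chars.find p ['\n'] ≠ -1
          then acc ++ [PySem.List.slice p (some (PySem.Chars.find p ['\n'] + 1)) none]
          else acc)
      [(stripFootsParts text).headD []]))

-- ===== PRECONDITION & SPEC =====
def Spec_stripFoots (text : String) (out : String) : Prop := out = stripFoots_alt text
instance (text : String) (out : String) : Decidable (Spec_stripFoots text out) := by unfold Spec_stripFoots; infer_instance

-- ===== CLAIM (what is proved, stated in full; the proofs are below) =====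
def Claim_equal_stripFoots : Prop := ∀ (text : String), Dom_stripFoots text → Spec_stripFoots text (stripFoots text)

-- ===== LEMMAS AND PROOFS =====

-- reference spec: g = outside-footnote scan, sk = inside-footnote scan
mutual
def pvG : List Char → List Char
  | [] => []
  | c :: t => if c = '[' then pvSk t else c :: pvG t
def pvSk : List Char → List Char
  | [] => []
  | c :: t => if c = '\n' then pvG t else pvSk t
end

-- structural characterisation of split-on-'['
def pvSp : List Char → List (List Char)
  | [] => [[]]
  | c :: t =>
    if c = '[' then [] :: pvSp t
    else match pvSp t with
      | [] => [[c]]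
      | h :: r => (c :: h) :: r

-- drop up to and including the first newline (empty if none)
def pvProc : List Char → List Char
  | [] => []
  | c :: t => if c = '\n' then t else pvProc t

theorem pvSp_ne_nil (l : List Char) : pvSp l ≠ [] := by
  cases l with
  | nil => simp [pvSp]
  | cons c t =>
    simp only [pvSp]
    split
    · simp
    · cases h : pvSp t <;> simp

-- A's fold from state 1 computes acc ++ pvG, from state 0 computes acc ++ pvSk
theorem pvFoldA (l : List Char) : ∀ acc : List Char,
    (l.foldl (fun (st : Int × List Char) char =>
      if char = '[' then (0, st.2)
      else if st.1 = 0 ∧ char = '\n' then (1, st.2)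
      else if st.1 = 0 then st
      else (st.1, st.2 ++ [char])) (1, acc)).2 = acc ++ pvG l ∧
    (l.foldl (fun (st : Int × List Char) char =>
      if char = '[' then (0, st.2)
      else if st.1 = 0 ∧ char = '\n' then (1, st.2)
      else if st.1 = 0 then st
      else (st.1, st.2 ++ [char])) (0, acc)).2 = acc ++ pvSk l := by
  induction l with
  | nil => intro acc; simp [pvG, pvSk]
  | cons c t ih =>
    intro acc
    by_cases hb : c = '['
    · simp [List.foldl_cons, hb, pvG, pvSk, (ih acc).2]
    · by_cases hn : c = '\n'
      · subst hn
        simp [List.foldl_cons, hb, pvG, pvSk, (ih acc).1, (ih (acc ++ ['\n'])).1]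
      · simp [List.foldl_cons, hb, hn, pvG, pvSk, (ih acc).2, (ih (acc ++ [c])).1]

-- find.go with a shifted base index
theorem pvFindGoShift (l : List Char) : ∀ k : Nat,
    PySem.Chars.find.go ['\n'] l k =
      if PySem.Chars.find l ['\n'] = -1 then -1 else k + PySem.Chars.find l ['\n'] := by
  induction l with
  | nil => intro k; simp [PySem.Chars.find.go, PySem.Chars.find]
  | cons c t ih =>
    intro k
    by_cases hn : c = '\n'
    · simp [PySem.Chars.find.go, PySem.Chars.find, hn, List.isPrefixOf]
    · have hpre : List.isPrefixOf ['\n'] (c :: t) = false := by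
        simp [List.isPrefixOf]
        exact fun h => hn h.symm
      simp only [PySem.Chars.find.go, PySem.Chars.find, hpre, Bool.false_eq_true, if_false] at *
      rw [ih (k + 1), ih 1]
      by_cases hf : PySem.Chars.find.go ['\n'] t 0 = -1
      · simp [hf]
      · have hge : -1 ≤ PySem.Chars.find.go ['\n'] t 0 := by
          have := PySem.Chars.neg_one_le_find t ['\n']
          simpa [PySem.Chars.find] using this
        have hne1 : (1 : Int) + PySem.Chars.find.go ['\n'] t 0 ≠ -1 := by omega
        simp only [hf, if_false]
        split_ifs with h <;> push_cast at h ⊢ <;> omega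

-- the find-then-slice body of B computes pvProc
theorem pvProcEq (p : List Char) :
    (if PySem.Chars.find p ['\n'] ≠ -1
      then [PySem.List.slice p (some (PySem.Chars.find p ['\n'] + 1)) none]
      else ([] : List (List Char))) = if PySem.Chars.find p ['\n'] ≠ -1 then [pvProc p] else [] := by
  induction p with
  | nil => simp [PySem.Chars.find, PySem.Chars.find.go]
  | cons c t ih =>
    by_cases hn : c = '\n'
    · have h0 : PySem.Chars.find (c :: t) ['\n'] = 0 := by
        simp [PySem.Chars.find, PySem.Chars.find.go, hn, List.isPrefixOf]
      rw [h0]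
      have h1 : PySem.List.slice (c :: t) (some ((0 : Int) + 1)) none = t := by
        have := PySem.List.slice_from_one (c :: t)
        norm_num
        simpa using this
      rw [h1]
      simp [pvProc, hn]
    · have hpre : List.isPrefixOf ['\n'] (c :: t) = false := by
        simp [List.isPrefixOf]
        exact fun h => hn h.symm
      have hstep : PySem.Chars.find (c :: t) ['\n'] =
          if PySem.Chars.find t ['\n'] = -1 then -1 else 1 + PySem.Chars.find t ['\n'] := by
        simp only [PySem.Chars.find, PySem.Chars.find.go, hpre, Bool.false_eq_true, if_false]
        have := pvFindGoShift t 1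
        simpa [PySem.Chars.find] using this
      have hproc : pvProc (c :: t) = pvProc t := by simp [pvProc, hn]
      by_cases hf : PySem.Chars.find t ['\n'] = -1
      · simp [hstep, hf]
      · have hge : -1 ≤ PySem.Chars.find t ['\n'] := PySem.Chars.neg_one_le_find t ['\n']
        have hne : (1 : Int) + PySem.Chars.find t ['\n'] ≠ -1 := by omega
        have hsl : PySem.List.slice (c :: t) (some (1 + PySem.Chars.find t ['\n'] + 1)) none
            = PySem.List.slice t (some (PySem.Chars.find t ['\n'] + 1)) none := by
          rw [PySem.List.slice_from (c :: t) (by omega), PySem.List.slice_from t (by omega)]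
          have h2 : (1 + PySem.Chars.find t ['\n'] + 1).toNat
              = (PySem.Chars.find t ['\n'] + 1).toNat + 1 := by omega
          rw [h2]
          simp
        rw [hstep, hproc]
        simp only [hf, if_false, hne, ne_eq, not_false_iff, if_true, hsl]
        simp only [hf, ne_eq, not_false_iff, if_true] at ih
        simpa using ih

-- splitOn.go with enough fuel computes pvSp (head prefixed by cur.reverse, acc.reverse in front)
theorem pvSplitGo (l : List Char) : ∀ (fuel : Nat) (cur : List Char) (acc : List (List Char)),
    l.length ≤ fuel →
    PySem.Chars.splitOn.go ['['] fuel l cur acc =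
      acc.reverse ++ (match pvSp l with
        | [] => [cur.reverse]
        | h :: r => (cur.reverse ++ h) :: r) := by
  induction l with
  | nil =>
    intro fuel cur acc _
    cases fuel <;> simp [PySem.Chars.splitOn.go, pvSp]
  | cons c t ih =>
    intro fuel cur acc hf
    cases fuel with
    | zero => simp at hf
    | succ fuel' =>
      by_cases hb : c = '['
      · have hpre : List.isPrefixOf ['['] (c :: t) = true := by
          simp [List.isPrefixOf, hb]
        simp only [PySem.Chars.splitOn.go, hpre, if_true, List.length_cons, List.length_nil,
          List.drop_succ_cons, List.drop_zero]
        rw [ih fuel' [] (cur.reverse :: acc) (by simpa using Nat.le_of_succ_le_succ hf)]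
        have hne := pvSp_ne_nil t
        cases hsp : pvSp t with
        | nil => exact absurd hsp hne
        | cons h r => simp [pvSp, hb, hsp]
      · have hpre : List.isPrefixOf ['['] (c :: t) = false := by
          simp [List.isPrefixOf]
          exact fun h => hb h.symm
        simp only [PySem.Chars.splitOn.go, hpre, Bool.false_eq_true, if_false]
        rw [ih fuel' (c :: cur) acc (by simpa using Nat.le_of_succ_le_succ hf)]
        have hne := pvSp_ne_nil t
        cases hsp : pvSp t with
        | nil => exact absurd hsp hne
        | cons h r => simp [pvSp, hb, hsp]

theorem pvSplitOnEq (l : List Char) : PySem.Chars.splitOn l ['['] = pvSp l := by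
  have := pvSplitGo l (l.length + 1) [] [] (by omega)
  have hne := pvSp_ne_nil l
  cases hsp : pvSp l with
  | nil => exact absurd hsp hne
  | cons h r =>
    rw [hsp] at this
    simpa [PySem.Chars.splitOn, hsp] using this

-- if there is no newline, pvProc drops everything
theorem pvProc_of_find_neg (p : List Char) (h : PySem.Chars.find p ['\n'] = -1) : pvProc p = [] := by
  induction p with
  | nil => rfl
  | cons c t ih =>
    by_cases hn : c = '\n'
    · exfalso
      have h0 : PySem.Chars.find (c :: t) ['\n'] = 0 := by
        simp [PySem.Chars.find, PySem.Chars.find.go, hn, List.isPrefixOf]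
      rw [h0] at h
      exact absurd h (by norm_num)
    · have hpre : List.isPrefixOf ['\n'] (c :: t) = false := by
        simp [List.isPrefixOf]
        exact fun hcontra => hn hcontra.symm
      have hstep : PySem.Chars.find (c :: t) ['\n'] =
          if PySem.Chars.find t ['\n'] = -1 then -1 else 1 + PySem.Chars.find t ['\n'] := by
        simp only [PySem.Chars.find, PySem.Chars.find.go, hpre, Bool.false_eq_true, if_false]
        have := pvFindGoShift t 1
        simpa [PySem.Chars.find] using this
      have hge : -1 ≤ PySem.Chars.find t ['\n'] := PySem.Chars.neg_one_le_find t ['\n']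
      have hft : PySem.Chars.find t ['\n'] = -1 := by
        rw [hstep] at h
        by_contra hc
        rw [if_neg hc] at h
        omega
      simp [pvProc, hn, ih hft]

-- join with empty separator is flatten
theorem pvJoinNil (xs : List (List Char)) : PySem.Chars.join [] xs = xs.flatten := by
  induction xs with
  | nil => rfl
  | cons h t ih =>
    cases t with
    | nil => simp [PySem.Chars.join, List.intercalate]
    | cons h2 t2 =>
      simp only [PySem.Chars.join, List.intercalate] at *
      simp [List.intersperse] at *
      simpa using ih

-- joint induction: pvG / pvSk against the split pieces
theorem pvGSk_sp (l : List Char) :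
    pvG l = (pvSp l).headD [] ++ ((pvSp l).tail.map pvProc).flatten ∧
    pvSk l = ((pvSp l).map pvProc).flatten := by
  induction l with
  | nil => simp [pvG, pvSk, pvSp, pvProc]
  | cons c t ih =>
    have hne := pvSp_ne_nil t
    cases hsp : pvSp t with
    | nil => exact absurd hsp hne
    | cons h r =>
      rw [hsp] at ih
      by_cases hb : c = '['
      · constructor
        · simp [pvG, pvSp, hb, hsp, ih.2]
        · have hc : c ≠ '\n' := by rw [hb]; decide
          simp [pvSk, pvSp, hb, hsp, pvProc, ih.2]
      · by_cases hn : c = '\n'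
        · constructor
          · simp [pvG, pvSp, hn, hsp, ih.1]
          · simp [pvSk, pvSp, hn, hsp, pvProc, ih.1]
        · constructor
          · simp [pvG, pvSp, hb, hsp, ih.1]
          · simp [pvSk, pvSp, hb, hn, hsp, pvProc, ih.2]

-- B's fold over pieces, flattened
theorem pvFoldB (ps : List (List Char)) : ∀ acc : List (List Char),
    (ps.foldl
      (fun (acc : List (List Char)) p =>
        if PySem.Chars.find p ['\n'] ≠ -1 then acc ++ [PySem.List.slice p (some (PySem.Chars.find p ['\n'] + 1)) none] else acc)
      acc).flatten = acc.flatten ++ (ps.map pvProc).flatten := by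
  induction ps with
  | nil => intro acc; simp
  | cons p ps ih =>
    intro acc
    by_cases hf : PySem.Chars.find p ['\n'] = -1
    · simp only [List.foldl_cons, hf, ne_eq, not_true_eq_false, if_false]
      rw [ih acc]
      simp [pvProc_of_find_neg p hf]
    · have hsl : [PySem.List.slice p (some (PySem.Chars.find p ['\n'] + 1)) none] = [pvProc p] := by
        have := pvProcEq p
        simpa [hf] using this
      simp only [List.foldl_cons, hf, ne_eq, not_false_iff, if_true, hsl]
      rw [ih (acc ++ [pvProc p])]
      simp

-- ===== VERDICT (by name: the statement is the Claim_ definition above) =====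
theorem stripFoots_spec : Claim_equal_stripFoots := by
  intro text _
  unfold Spec_stripFoots stripFoots stripFoots_alt stripFootsParts
  rw [pvSplitOnEq, PySem.List.slice_from_one]
  have hne := pvSp_ne_nil text.toList
  cases hsp : pvSp text.toList with
  | nil => exact absurd hsp hne
  | cons h r =>
    have hA := (pvFoldA text.toList []).1
    simp only [List.nil_append] at hA
    simp only [hA, List.headD_cons, List.tail_cons]
    rw [pvJoinNil]
    rw [pvFoldB r [h]]
    have hG := (pvGSk_sp text.toList).1
    rw [hsp] at hG
    simp only [List.headD_cons, List.tail_cons] at hG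
    rw [hG]
    simp
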